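-- pv_equiv track=rewrite | github.com/samaratrilling/declass | declass/text_processors.py | _parse_preamble
-- ===== SOURCE A (Python) =====
-- def _parse_preamble(preamble):
--     """
--     Parse the VW preamble: [target] [Importance [Tag]]
--     and return a dict with keys 'tag', 'target', 'importance' iff
--     the corresponding values were found in the preamble.
--     """
--     # If preamble was butted directly against a pipe, then the right-most
--     # part is a tag....extract it and continue.
--     if preamble[-1] != ' ':
--         tag_left = preamble.rfind(' ')
--         tag = preamble[tag_left + 1:]
--         preamble = preamble[: tag_left]
--     else:
--         tag = None
--
--     # Step from left to right through preamble.
--     # We are in the target until we encounter the first space...if there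
--     # is no target, then the first character will be a space.
--     in_target = True
--     target = ''
--     importance = ''
--     for char in preamble:
--         if char == ' ':
--             in_target = False
--         elif in_target:
--             target += char
--         else:
--             importance += char
--
--     parsed = {}
--     items = (('tag', tag), ('target', target), ('importance', importance))
--     for key, value in items:
--         if value:
--             parsed[key] = value
--
--     return parsed
-- ===== SOURCE B (Python) =====
-- def _parse_preamble(preamble):
--     # Same tag-extraction guard as the original (it defines the behaviour,
--     # including the rfind == -1 slicing).
--     if preamble[-1] != ' ':
--         tag_left = preamble.rfind(' ')
--         tag = preamble[tag_left + 1:]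
--         preamble = preamble[:tag_left]
--     else:
--         tag = None
--
--     # target = everything before the first space; importance = all
--     # non-space characters after it (same space-collapsing as the loop).
--     target, _, rest = preamble.partition(' ')
--     importance = rest.replace(' ', '')
--
--     items = (('tag', tag), ('target', target), ('importance', importance))
--     return {key: value for key, value in items if value}
-- ===== Notes on version B (the rewrite author's own statement) =====
-- stated objective: simpler
-- what changed: The stateful char-by-char loop with the in_target flag and the dict-building loop are replaced by str.partition + str.replace (C-level string ops instead of per-character Python string concatenation) and a dict comprehension over the same items.
import Mathlib
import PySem

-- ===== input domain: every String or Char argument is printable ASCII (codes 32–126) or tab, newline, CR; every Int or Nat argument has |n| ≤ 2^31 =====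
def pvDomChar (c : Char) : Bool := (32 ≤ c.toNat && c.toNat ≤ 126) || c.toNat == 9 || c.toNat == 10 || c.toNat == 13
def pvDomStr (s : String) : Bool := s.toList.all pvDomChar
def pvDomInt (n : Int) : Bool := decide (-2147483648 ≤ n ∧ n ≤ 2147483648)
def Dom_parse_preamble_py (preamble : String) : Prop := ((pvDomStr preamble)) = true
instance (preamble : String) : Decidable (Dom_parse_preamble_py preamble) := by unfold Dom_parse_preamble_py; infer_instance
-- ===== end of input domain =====

-- B replaces A's stateful char loop and dict-building loop with partition/replace-style
-- decomposition and a filtered comprehension (objective: simpler).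


-- ===== PORT A =====
-- one step of A's char loop; state = (in_target, target, importance)
def pvStepA (st : Bool × List Char × List Char) (c : Char) : Bool × List Char × List Char :=
  if c = ' ' then (false, st.2.1, st.2.2)
  else if st.1 then (st.1, st.2.1 ++ [c], st.2.2)
  else (st.1, st.2.1, st.2.2 ++ [c])

-- A's final dict-building loop over (('tag', tag), ('target', target), ('importance', importance))
def pvBuildA (tag : Option (List Char)) (target importance : List Char) : List (String × String) :=
  let d0 : PySem.Dict String String := PySem.Dict.empty
  let d1 := match tag with
    | some t => if t ≠ [] then d0.insert "tag" (String.ofList t) else d0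
    | none => d0
  let d2 := if target ≠ [] then d1.insert "target" (String.ofList target) else d1
  let d3 := if importance ≠ [] then d2.insert "importance" (String.ofList importance) else d2
  d3.items

def parse_preamble_py (preamble : String) : List (String × String) :=
  let cs := preamble.toList
  let tb : Option (List Char) × List Char :=
    match PySem.List.pyGet? cs (-1) with
    | none => (none, cs)  -- empty preamble: Python raises IndexError here (excluded by Pre_)
    | some last =>
      if last ≠ ' ' then
        let tag_left := PySem.Chars.rfind cs [' ']
        (some (PySem.List.slice cs (some (tag_left + 1)) none),
         PySem.List.slice cs none (some tag_left))
      else (none, cs)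
  let st := tb.2.foldl pvStepA (true, [], [])
  pvBuildA tb.1 st.2.1 st.2.2

-- ===== PORT B =====
def parse_preamble_py_alt (preamble : String) : List (String × String) :=
  let cs := preamble.toList
  let tb : Option (List Char) × List Char :=
    match PySem.List.pyGet? cs (-1) with
    | none => (none, cs)  -- empty preamble: Python raises IndexError here (excluded by Pre_)
    | some last =>
      if last ≠ ' ' then
        let tag_left := PySem.Chars.rfind cs [' ']
        (some (PySem.List.slice cs (some (tag_left + 1)) none),
         PySem.List.slice cs none (some tag_left))
      else (none, cs)
  -- target, _, rest = body.partition(' '); importance = rest.replace(' ', '')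
  let target := tb.2.takeWhile (· ≠ ' ')
  let importance := ((tb.2.dropWhile (· ≠ ' ')).drop 1).filter (· ≠ ' ')
  ([("tag", tb.1), ("target", some target), ("importance", some importance)]
     : List (String × Option (List Char))).filterMap
    (fun kv => match kv.2 with
      | some v => if v = [] then none else some (kv.1, String.ofList v)
      | none => none)

-- ===== PRECONDITION & SPEC =====
-- Pre_ excludes only the empty string, on which A raises IndexError (preamble[-1]).
def Pre_parse_preamble_py (preamble : String) : Prop := preamble ≠ ""
instance (preamble : String) : Decidable (Pre_parse_preamble_py preamble) := by unfold Pre_parse_preamble_py; infer_instance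
def pvWitness_parse_preamble_py : String := "a 2 b"

def Spec_parse_preamble_py (preamble : String) (out : List (String × String)) : Prop := out = parse_preamble_py_alt preamble
instance (preamble : String) (out : List (String × String)) : Decidable (Spec_parse_preamble_py preamble out) := by unfold Spec_parse_preamble_py; infer_instance

-- ===== CLAIM (what is proved, stated in full; the proofs are below) =====
def Claim_equal_parse_preamble_py : Prop := ∀ (preamble : String), Dom_parse_preamble_py preamble → Pre_parse_preamble_py preamble → Spec_parse_preamble_py preamble (parse_preamble_py preamble)

-- ===== LEMMAS AND PROOFS =====
theorem pvLoopA (cs : List Char) (t imp : List Char) :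
    cs.foldl pvStepA (false, t, imp) = (false, t, imp ++ cs.filter (· ≠ ' ')) := by
  induction cs generalizing imp with
  | nil => simp
  | cons c cs ih =>
    by_cases h : c = ' ' <;> simp [pvStepA, h, ih]

theorem pvLoopMain (cs : List Char) (t : List Char) :
    (cs.foldl pvStepA (true, t, [])).2 =
      (t ++ cs.takeWhile (· ≠ ' '), ((cs.dropWhile (· ≠ ' ')).drop 1).filter (· ≠ ' ')) := by
  induction cs generalizing t with
  | nil => simp
  | cons c cs ih =>
    by_cases h : c = ' '
    · simp [pvStepA, h, pvLoopA]
    · simpa [pvStepA, h] using ih (t ++ [c])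

theorem pvBuild_eq (tag : Option (List Char)) (target importance : List Char) :
    pvBuildA tag target importance =
      ([("tag", tag), ("target", some target), ("importance", some importance)]
         : List (String × Option (List Char))).filterMap
        (fun kv => match kv.2 with
          | some v => if v = [] then none else some (kv.1, String.ofList v)
          | none => none) := by
  cases tag with
  | none =>
    by_cases ht : target = [] <;> by_cases hi : importance = [] <;>
      simp [pvBuildA, ht, hi, PySem.Dict.insert, PySem.Dict.empty,
        PySem.Dict.contains]
  | some tg =>
    by_cases hg : tg = [] <;> by_cases ht : target = [] <;> by_cases hi : importance = [] <;>
      simp [pvBuildA, hg, ht, hi, PySem.Dict.insert, PySem.Dict.empty,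
        PySem.Dict.contains]

-- ===== VERDICT (by name: the statement is the Claim_ definition above) =====
theorem parse_preamble_py_spec : Claim_equal_parse_preamble_py := by
  intro preamble _ _
  unfold Spec_parse_preamble_py parse_preamble_py parse_preamble_py_alt
  cases h : PySem.List.pyGet? preamble.toList (-1) with
  | none => simp [pvLoopMain, pvBuild_eq]
  | some last =>
    by_cases hl : last = ' '
    · simp [hl, pvLoopMain, pvBuild_eq]
    · simp [hl, pvLoopMain, pvBuild_eq]
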